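-- pv_equiv track=rewrite | github.com/AishwaryaPriyadarshiniR/neurolens_edii | backend.py | extract_key_points_locally
-- ===== SOURCE A (Python) =====
-- def extract_key_points_locally(text: str, max_points: int = 5) -> list[str]:
--     cleaned = (text or "").replace("\n", " ").strip()
--     if not cleaned:
--         return []
--
--     raw_sentences = [s.strip() for s in cleaned.split(".") if s.strip()]
--     if not raw_sentences:
--         return []
--
--     keywords = ("important", "key", "must", "should", "therefore", "because", "definition")
--     scored = []
--     for sentence in raw_sentences:
--         score = 0
--         lower = sentence.lower()
--         if any(k in lower for k in keywords):
--             score += 2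
--         score += min(len(sentence) // 80, 2)
--         scored.append((score, sentence))
--
--     scored.sort(key=lambda x: x[0], reverse=True)
--     selected = [s for _, s in scored[:max_points]]
--     if not selected:
--         selected = raw_sentences[:max_points]
--     return [p[:220] + ("..." if len(p) > 220 else "") for p in selected]
-- ===== SOURCE B (Python) =====
-- def extract_key_points_locally(text: str, max_points: int = 5) -> list[str]:
--     cleaned = (text or "").replace("\n", " ").strip()
--     keywords = ("important", "key", "must", "should", "therefore", "because", "definition")
--     # One pass: drop empty fragments and bucket each sentence by its score (always 0..4).
--     b4, b3, b2, b1, b0 = [], [], [], [], []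
--     for part in cleaned.split("."):
--         s = part.strip()
--         if not s:
--             continue
--         score = (2 if any(k in s.lower() for k in keywords) else 0) + min(len(s) // 80, 2)
--         if score == 4:
--             b4.append(s)
--         elif score == 3:
--             b3.append(s)
--         elif score == 2:
--             b2.append(s)
--         elif score == 1:
--             b1.append(s)
--         else:
--             b0.append(s)
--     selected = (b4 + b3 + b2 + b1 + b0)[:max_points]
--     return [p if len(p) <= 220 else p[:220] + "..." for p in selected]
-- ===== Notes on version B (the rewrite author's own statement) =====
-- stated objective: alternative
-- what changed: Replaces A's three-stage pipeline (build raw sentence list, build scored pair list, stable reverse sort, slice, fallback) by a single pass over the split fragments that strips, filters and buckets each sentence into five score lists (scores are always 0..4), then concatenates the buckets in descending score order, which reproduces the stable sort's tie order without sorting; the never-effective fallback branch is dropped.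
import Mathlib
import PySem

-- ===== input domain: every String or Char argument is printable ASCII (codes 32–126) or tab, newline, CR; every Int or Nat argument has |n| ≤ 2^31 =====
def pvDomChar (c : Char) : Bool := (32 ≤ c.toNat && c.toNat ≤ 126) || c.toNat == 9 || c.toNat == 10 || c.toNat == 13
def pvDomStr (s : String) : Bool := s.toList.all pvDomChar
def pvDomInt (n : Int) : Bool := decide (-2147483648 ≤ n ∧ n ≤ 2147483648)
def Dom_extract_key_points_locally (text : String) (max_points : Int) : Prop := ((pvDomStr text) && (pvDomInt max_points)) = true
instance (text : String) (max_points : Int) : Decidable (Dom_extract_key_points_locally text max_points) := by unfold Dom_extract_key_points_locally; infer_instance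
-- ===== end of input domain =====

-- B replaces A's score-list + stable reverse sort + fallback pipeline by a single pass that
-- buckets each stripped sentence into five score lists (scores are 0..4) concatenated in
-- descending score order (same output, no sort; the fallback can never change the result).

-- ===== PORT A =====
def pvKeywordsA : List String := ["important", "key", "must", "should", "therefore", "because", "definition"]

-- score of one sentence, as A's loop body computes it
def pvScoreA (sentence : String) : Int :=
  (if pvKeywordsA.any (fun k => PySem.Str.isIn k (PySem.Str.lower sentence)) then (2 : Int) else 0)
    + min (PySem.Int.floordiv (PySem.Str.len sentence) 80) 2

-- p[:220] + ("..." if len(p) > 220 else "")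
def pvTruncA (p : String) : String :=
  String.ofList (PySem.Chars.slice p.toList none (some 220)
    ++ (if 220 < PySem.Str.len p then "...".toList else []))

def extract_key_points_locally (text : String) (max_points : Int) : List String :=
  let cleaned := PySem.Str.strip (PySem.Str.replace text "\n" " ")
  if cleaned == "" then []
  else
    let raw_sentences := (((PySem.Str.split? cleaned ".").getD []).map PySem.Str.strip).filter
      (fun s => !(s == ""))
    if raw_sentences == [] then []
    else
      let scored := raw_sentences.foldl (fun acc sentence => acc ++ [(pvScoreA sentence, sentence)]) []
      let scoredSorted := PySem.List.sorted scored (fun x => x.1) true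
      let selected := (PySem.List.slice scoredSorted none (some max_points)).map (fun x => x.2)
      let selected := if selected == [] then PySem.List.slice raw_sentences none (some max_points) else selected
      selected.map pvTruncA

-- ===== PORT B =====
def pvKeywordsB : List String := ["important", "key", "must", "should", "therefore", "because", "definition"]

-- the loop body: strip the fragment, skip it if empty, otherwise append it to its score bucket
def pvStepB (st : List String × List String × List String × List String × List String)
    (part : String) : List String × List String × List String × List String × List String :=
  let s := PySem.Str.strip part
  if s == "" then st
  else
    let score := (if pvKeywordsB.any (fun k => PySem.Str.isIn k (PySem.Str.lower s)) then (2 : Int) else 0)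
      + min (PySem.Int.floordiv (PySem.Str.len s) 80) 2
    let (b4, b3, b2, b1, b0) := st
    if score == 4 then (b4 ++ [s], b3, b2, b1, b0)
    else if score == 3 then (b4, b3 ++ [s], b2, b1, b0)
    else if score == 2 then (b4, b3, b2 ++ [s], b1, b0)
    else if score == 1 then (b4, b3, b2, b1 ++ [s], b0)
    else (b4, b3, b2, b1, b0 ++ [s])

def extract_key_points_locally_alt (text : String) (max_points : Int) : List String :=
  let cleaned := PySem.Str.strip (PySem.Str.replace text "\n" " ")
  let st := ((PySem.Str.split? cleaned ".").getD []).foldl pvStepB ([], [], [], [], [])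
  let selected := PySem.List.slice (st.1 ++ st.2.1 ++ st.2.2.1 ++ st.2.2.2.1 ++ st.2.2.2.2)
    none (some max_points)
  -- p if len(p) <= 220 else p[:220] + "..."
  selected.map (fun p =>
    if PySem.Str.len p ≤ 220 then p
    else String.ofList (PySem.Chars.slice p.toList none (some 220) ++ "...".toList))

-- ===== PRECONDITION & SPEC =====
def Spec_extract_key_points_locally (text : String) (max_points : Int) (out : List String) : Prop := out = extract_key_points_locally_alt text max_points
instance (text : String) (max_points : Int) (out : List String) : Decidable (Spec_extract_key_points_locally text max_points out) := by unfold Spec_extract_key_points_locally; infer_instance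

-- ===== CLAIM (what is proved, stated in full; the proofs are below) =====
def Claim_equal_extract_key_points_locally : Prop := ∀ (text : String) (max_points : Int), Dom_extract_key_points_locally text max_points → Spec_extract_key_points_locally text max_points (extract_key_points_locally text max_points)

-- ===== LEMMAS AND PROOFS =====

theorem pvScoreA_mem (s : String) : 0 ≤ pvScoreA s ∧ pvScoreA s ≤ 4 := by
  unfold pvScoreA
  have h1 : 0 ≤ PySem.Int.floordiv (PySem.Str.len s) 80 := by
    exact Int.fdiv_nonneg (by rw [PySem.Str.len_eq]; positivity) (by norm_num)
  constructor <;> split_ifs <;> omega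

-- the stripped, non-empty fragments (A's raw_sentences, B's surviving loop iterations)
def pvRawB (parts : List String) : List String :=
  (parts.map PySem.Str.strip).filter (fun s => !(s == ""))

def pvF (k : Int) (parts : List String) : List String :=
  (pvRawB parts).filter (fun s => pvScoreA s == k)

-- B's single pass computes the five score buckets
theorem pvStepB_buckets (parts : List String) (b4 b3 b2 b1 b0 : List String) :
    parts.foldl pvStepB (b4, b3, b2, b1, b0)
      = (b4 ++ pvF 4 parts, b3 ++ pvF 3 parts, b2 ++ pvF 2 parts,
         b1 ++ pvF 1 parts, b0 ++ pvF 0 parts) := by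
  induction parts generalizing b4 b3 b2 b1 b0 with
  | nil => simp [pvF, pvRawB]
  | cons p rest ih =>
    have hraw : pvRawB (p :: rest)
        = if (PySem.Str.strip p == "") = true then pvRawB rest
          else PySem.Str.strip p :: pvRawB rest := by
      simp only [pvRawB, List.map_cons, List.filter_cons]
      split_ifs with h <;> simp_all
    by_cases h : (PySem.Str.strip p == "") = true
    · have hstep : pvStepB (b4, b3, b2, b1, b0) p = (b4, b3, b2, b1, b0) := by
        simp [pvStepB, h]
      simp only [List.foldl_cons, hstep, ih, pvF, hraw, if_pos h]
    · have hsc : ((if pvKeywordsB.any (fun k => PySem.Str.isIn k (PySem.Str.lower (PySem.Str.strip p))) then (2 : Int) else 0)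
          + min (PySem.Int.floordiv (PySem.Str.len (PySem.Str.strip p)) 80) 2) = pvScoreA (PySem.Str.strip p) := rfl
      have hF : ∀ k : Int, pvF k (p :: rest)
          = (if pvScoreA (PySem.Str.strip p) == k then [PySem.Str.strip p] else []) ++ pvF k rest := by
        intro k
        simp only [pvF, hraw, if_neg h, List.filter_cons]
        split_ifs <;> simp_all
      obtain ⟨h0, h4⟩ := pvScoreA_mem (PySem.Str.strip p)
      simp only [List.foldl_cons, pvStepB, h, Bool.false_eq_true, if_false, hsc]
      interval_cases hv : (pvScoreA (PySem.Str.strip p)) <;>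
        simp only [hF, ih] <;>
        simp

-- length of a prefix slice depends only on the list's length
theorem pv_slice_len {α β : Type} (xs : List α) (ys : List β) (b : Int) (h : xs.length = ys.length) :
    (PySem.List.slice xs none (some b)).length = (PySem.List.slice ys none (some b)).length := by
  simp [PySem.List.slice, h]

-- slicing a mapped list = mapping the slice
theorem pv_slice_map {α β : Type} (f : α → β) (xs : List α) (a b : Option Int) :
    PySem.List.slice (xs.map f) a b = (PySem.List.slice xs a b).map f := by
  simp [PySem.List.slice, List.map_drop, List.map_take]

theorem pv_slice_nil {α : Type} (a b : Option Int) :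
    PySem.List.slice ([] : List α) a b = [] := by
  simp [PySem.List.slice]

-- insertBy for the reverse sort puts x after all elements with key ≥ key x and before those with key < key x
theorem pv_insertBy_split (x : Int × String) (hi lo : List (Int × String))
    (hhi : ∀ y ∈ hi, x.1 ≤ y.1) (hlo : ∀ y ∈ lo, y.1 < x.1) :
    PySem.List.insertBy (fun a b => decide (b.1 < a.1)) x (hi ++ lo) = hi ++ x :: lo := by
  induction hi with
  | nil =>
    cases lo with
    | nil => simp [PySem.List.insertBy]
    | cons y ys => simp [PySem.List.insertBy, hlo y (by simp)]
  | cons h hs ih =>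
    have hx : ¬ h.1 < x.1 := not_lt.mpr (hhi h (by simp))
    simp only [List.cons_append, PySem.List.insertBy, hx]
    simp only [decide_eq_true_eq]
    exact congrArg (h :: ·) (ih (fun y hy => hhi y (List.mem_cons_of_mem _ hy)))

-- the insertion reverse sort with scores in 0..4 is the descending bucket concatenation
theorem pv_sorted_buckets (xs : List (Int × String)) (h : ∀ p ∈ xs, 0 ≤ p.1 ∧ p.1 ≤ 4) :
    PySem.List.sorted xs (fun x => x.1) true =
      xs.filter (fun p => p.1 == 4) ++ xs.filter (fun p => p.1 == 3) ++ xs.filter (fun p => p.1 == 2)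
        ++ xs.filter (fun p => p.1 == 1) ++ xs.filter (fun p => p.1 == 0) := by
  rw [PySem.List.sorted_rev_eq_foldl_insertBy]
  induction xs using List.reverseRecOn with
  | nil => simp
  | append_singleton xs x ih =>
    rw [List.foldl_append, List.foldl_cons, List.foldl_nil,
      ih (fun p hp => h p (by simp [hp]))]
    obtain ⟨sc, sen⟩ := x
    obtain ⟨h0, h4⟩ := h (sc, sen) (by simp)
    simp only at h0 h4
    have hmem : ∀ (k : Int) (y : Int × String), y ∈ xs.filter (fun p => p.1 == k) → y.1 = k := by
      intro k y hy
      simpa using List.of_mem_filter hy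
    have hf : ∀ (k : Int), (xs ++ [(sc, sen)]).filter (fun p => p.1 == k) =
        xs.filter (fun p => p.1 == k) ++ (if sc = k then [(sc, sen)] else []) := by
      intro k
      rw [List.filter_append]
      congr 1
      simp [List.filter_singleton]
    simp only [hf]
    interval_cases sc
    all_goals simp only [reduceIte]
    case «0» =>
      norm_num
      rw [show List.filter (fun p => p.1 == 4) xs ++ (List.filter (fun p => p.1 == 3) xs ++ (List.filter (fun p => p.1 == 2) xs ++ (List.filter (fun p => p.1 == 1) xs ++ (List.filter (fun p => p.1 == 0) xs)))) =
          (List.filter (fun p => p.1 == 4) xs ++ (List.filter (fun p => p.1 == 3) xs ++ (List.filter (fun p => p.1 == 2) xs ++ (List.filter (fun p => p.1 == 1) xs ++ (List.filter (fun p => p.1 == 0) xs))))) ++ (([] : List (Int × String))) from by simp,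
        pv_insertBy_split (0, sen) _ _ ?hhi ?hlo]
      case hhi =>
        intro y hy
        show (0 : Int) ≤ y.1
        simp only [List.mem_append] at hy
        (repeat' rcases hy with hy|hy) <;>
          first
          | (have := hmem 4 y hy; omega)
          | (have := hmem 3 y hy; omega)
          | (have := hmem 2 y hy; omega)
          | (have := hmem 1 y hy; omega)
          | (have := hmem 0 y hy; omega)
      case hlo =>
        intro y hy
        simp at hy
      all_goals simp
    case «1» =>
      norm_num
      rw [show List.filter (fun p => p.1 == 4) xs ++ (List.filter (fun p => p.1 == 3) xs ++ (List.filter (fun p => p.1 == 2) xs ++ (List.filter (fun p => p.1 == 1) xs ++ (List.filter (fun p => p.1 == 0) xs)))) =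
          (List.filter (fun p => p.1 == 4) xs ++ (List.filter (fun p => p.1 == 3) xs ++ (List.filter (fun p => p.1 == 2) xs ++ (List.filter (fun p => p.1 == 1) xs)))) ++ (List.filter (fun p => p.1 == 0) xs) from by simp,
        pv_insertBy_split (1, sen) _ _ ?hhi ?hlo]
      case hhi =>
        intro y hy
        show (1 : Int) ≤ y.1
        simp only [List.mem_append] at hy
        (repeat' rcases hy with hy|hy) <;>
          first
          | (have := hmem 4 y hy; omega)
          | (have := hmem 3 y hy; omega)
          | (have := hmem 2 y hy; omega)
          | (have := hmem 1 y hy; omega)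
          | (have := hmem 0 y hy; omega)
      case hlo =>
        intro y hy
        show y.1 < (1 : Int)
        simp only [List.mem_append] at hy
        (repeat' rcases hy with hy|hy) <;>
          first
          | (have := hmem 4 y hy; omega)
          | (have := hmem 3 y hy; omega)
          | (have := hmem 2 y hy; omega)
          | (have := hmem 1 y hy; omega)
          | (have := hmem 0 y hy; omega)
      all_goals simp
    case «2» =>
      norm_num
      rw [show List.filter (fun p => p.1 == 4) xs ++ (List.filter (fun p => p.1 == 3) xs ++ (List.filter (fun p => p.1 == 2) xs ++ (List.filter (fun p => p.1 == 1) xs ++ (List.filter (fun p => p.1 == 0) xs)))) =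
          (List.filter (fun p => p.1 == 4) xs ++ (List.filter (fun p => p.1 == 3) xs ++ (List.filter (fun p => p.1 == 2) xs))) ++ (List.filter (fun p => p.1 == 1) xs ++ (List.filter (fun p => p.1 == 0) xs)) from by simp,
        pv_insertBy_split (2, sen) _ _ ?hhi ?hlo]
      case hhi =>
        intro y hy
        show (2 : Int) ≤ y.1
        simp only [List.mem_append] at hy
        (repeat' rcases hy with hy|hy) <;>
          first
          | (have := hmem 4 y hy; omega)
          | (have := hmem 3 y hy; omega)
          | (have := hmem 2 y hy; omega)
          | (have := hmem 1 y hy; omega)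
          | (have := hmem 0 y hy; omega)
      case hlo =>
        intro y hy
        show y.1 < (2 : Int)
        simp only [List.mem_append] at hy
        (repeat' rcases hy with hy|hy) <;>
          first
          | (have := hmem 4 y hy; omega)
          | (have := hmem 3 y hy; omega)
          | (have := hmem 2 y hy; omega)
          | (have := hmem 1 y hy; omega)
          | (have := hmem 0 y hy; omega)
      all_goals simp
    case «3» =>
      norm_num
      rw [show List.filter (fun p => p.1 == 4) xs ++ (List.filter (fun p => p.1 == 3) xs ++ (List.filter (fun p => p.1 == 2) xs ++ (List.filter (fun p => p.1 == 1) xs ++ (List.filter (fun p => p.1 == 0) xs)))) =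
          (List.filter (fun p => p.1 == 4) xs ++ (List.filter (fun p => p.1 == 3) xs)) ++ (List.filter (fun p => p.1 == 2) xs ++ (List.filter (fun p => p.1 == 1) xs ++ (List.filter (fun p => p.1 == 0) xs))) from by simp,
        pv_insertBy_split (3, sen) _ _ ?hhi ?hlo]
      case hhi =>
        intro y hy
        show (3 : Int) ≤ y.1
        simp only [List.mem_append] at hy
        (repeat' rcases hy with hy|hy) <;>
          first
          | (have := hmem 4 y hy; omega)
          | (have := hmem 3 y hy; omega)
          | (have := hmem 2 y hy; omega)
          | (have := hmem 1 y hy; omega)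
          | (have := hmem 0 y hy; omega)
      case hlo =>
        intro y hy
        show y.1 < (3 : Int)
        simp only [List.mem_append] at hy
        (repeat' rcases hy with hy|hy) <;>
          first
          | (have := hmem 4 y hy; omega)
          | (have := hmem 3 y hy; omega)
          | (have := hmem 2 y hy; omega)
          | (have := hmem 1 y hy; omega)
          | (have := hmem 0 y hy; omega)
      all_goals simp
    case «4» =>
      norm_num
      rw [show List.filter (fun p => p.1 == 4) xs ++ (List.filter (fun p => p.1 == 3) xs ++ (List.filter (fun p => p.1 == 2) xs ++ (List.filter (fun p => p.1 == 1) xs ++ (List.filter (fun p => p.1 == 0) xs)))) =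
          (List.filter (fun p => p.1 == 4) xs) ++ (List.filter (fun p => p.1 == 3) xs ++ (List.filter (fun p => p.1 == 2) xs ++ (List.filter (fun p => p.1 == 1) xs ++ (List.filter (fun p => p.1 == 0) xs)))) from by simp,
        pv_insertBy_split (4, sen) _ _ ?hhi ?hlo]
      case hhi =>
        intro y hy
        show (4 : Int) ≤ y.1
        simp only [List.mem_append] at hy
        (repeat' rcases hy with hy|hy) <;>
          first
          | (have := hmem 4 y hy; omega)
          | (have := hmem 3 y hy; omega)
          | (have := hmem 2 y hy; omega)
          | (have := hmem 1 y hy; omega)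
          | (have := hmem 0 y hy; omega)
      case hlo =>
        intro y hy
        show y.1 < (4 : Int)
        simp only [List.mem_append] at hy
        (repeat' rcases hy with hy|hy) <;>
          first
          | (have := hmem 4 y hy; omega)
          | (have := hmem 3 y hy; omega)
          | (have := hmem 2 y hy; omega)
          | (have := hmem 1 y hy; omega)
          | (have := hmem 0 y hy; omega)

-- A's sorted-and-projected list is the descending bucket concatenation over the sentences
theorem pv_ordered_eq (parts : List String) :
    ((PySem.List.sorted ((pvRawB parts).map (fun s => (pvScoreA s, s))) (fun x => x.1) true).map
        (fun x => x.2))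
      = pvF 4 parts ++ pvF 3 parts ++ pvF 2 parts ++ pvF 1 parts ++ pvF 0 parts := by
  rw [pv_sorted_buckets _ (by
    intro p hp
    simp only [List.mem_map] at hp
    obtain ⟨s, _, rfl⟩ := hp
    exact pvScoreA_mem s)]
  have hfm : ∀ k : Int,
      ((pvRawB parts).map (fun s => (pvScoreA s, s))).filter (fun p => p.1 == k)
        = (pvF k parts).map (fun s => (pvScoreA s, s)) := by
    intro k
    rw [List.filter_map]
    rfl
  simp [hfm, pvF, List.map_map, Function.comp_def]

-- the two truncation expressions agree
theorem pv_trunc_eq : pvTruncA = (fun p =>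
    if PySem.Str.len p ≤ 220 then p
    else String.ofList (PySem.Chars.slice p.toList none (some 220) ++ "...".toList)) := by
  funext p
  unfold pvTruncA
  by_cases h : 220 < PySem.Str.len p
  · rw [if_pos h, if_neg (by omega)]
  · rw [if_neg h, if_pos (by omega)]
    have hlen : p.toList.length ≤ 220 := by
      have := PySem.Str.len_eq p
      omega
    simp [PySem.Chars.slice_eq_listSlice, PySem.List.slice_to _ (by norm_num : (0:Int) ≤ 220),
      List.take_of_length_le hlen]

-- ===== VERDICT (by name: the statement is the Claim_ definition above) =====
theorem extract_key_points_locally_spec : Claim_equal_extract_key_points_locally := by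
  intro text mp _
  unfold Spec_extract_key_points_locally extract_key_points_locally extract_key_points_locally_alt
  dsimp only
  rw [pvStepB_buckets]
  simp only [List.nil_append]
  set parts := (PySem.Str.split? (PySem.Str.strip (PySem.Str.replace text "\n" " ")) ".").getD []
    with hparts
  by_cases h1 : (PySem.Str.strip (PySem.Str.replace text "\n" " ") == "") = true
  · have hc : PySem.Str.strip (PySem.Str.replace text "\n" " ") = "" := eq_of_beq h1
    have hp : parts = [""] := by rw [hparts, hc]; decide
    have hraw : pvRawB parts = [] := by rw [hp]; decide
    have hFnil : ∀ k : Int, pvF k parts = [] := by intro k; simp [pvF, hraw]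
    simp [h1, hFnil, pv_slice_nil]
  · simp only [h1, Bool.false_eq_true, if_false]
    by_cases h2 : (((parts.map PySem.Str.strip).filter (fun s => !(s == "")) : List String) == []) = true
    · have hraw : pvRawB parts = [] := by
        have := eq_of_beq h2
        simpa [pvRawB] using this
      have hFnil : ∀ k : Int, pvF k parts = [] := by intro k; simp [pvF, hraw]
      simp [h2, hFnil, pv_slice_nil]
    · simp only [h2, Bool.false_eq_true, if_false]
      simp only [PySem.List.foldl_append_singleton_eq_map, List.nil_append]
      have hraw : (parts.map PySem.Str.strip).filter (fun s => !(s == "")) = pvRawB parts := rfl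
      rw [hraw]
      by_cases h3 : ((PySem.List.slice
            (PySem.List.sorted ((pvRawB parts).map (fun s => (pvScoreA s, s))) (fun x => x.1) true)
            none (some mp)).map (fun x => x.2)) = []
      · rw [if_pos (by simpa using h3)]
        -- the fallback slice of raw_sentences has the same length, hence is empty too
        have hnil : PySem.List.slice (pvRawB parts) none (some mp) = [] := by
          apply List.eq_nil_of_length_eq_zero
          rw [pv_slice_len (pvRawB parts)
            (PySem.List.sorted ((pvRawB parts).map (fun s => (pvScoreA s, s))) (fun x => x.1) true) mp
            (by rw [PySem.List.length_sorted, List.length_map])]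
          have := congrArg List.length h3
          simpa using this
        have hord : PySem.List.slice
            (pvF 4 parts ++ pvF 3 parts ++ pvF 2 parts ++ pvF 1 parts ++ pvF 0 parts)
            none (some mp) = [] := by
          rw [← pv_ordered_eq parts, pv_slice_map]
          exact h3
        rw [hnil, hord]
        simp
      · rw [if_neg (by simpa using h3)]
        rw [← pv_slice_map, pv_ordered_eq parts, pv_trunc_eq]
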